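-- pv_equiv track=rewrite | github.com/rvaughan/AdventOfCode2017 | 2020/day_06/solution_p2.py | calc_questions
-- ===== SOURCE A (Python) =====
-- from collections import defaultdict
--
-- def calc_questions(questions, num_passengers):
--     answers = defaultdict(int)
--     for answer in questions:
--         answers[answer] += 1
--
--     count = 0
--     for answer in answers:
--         if answers[answer] == num_passengers:
--             count += 1
--
--     return count
-- ===== SOURCE B (Python) =====
-- def calc_questions(questions, num_passengers):
--     count = 0
--     run = 0
--     prev = None
--     for q in sorted(questions):
--         if run > 0 and q == prev:
--             run += 1
--         else:
--             if run > 0 and run == num_passengers: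
--                 count += 1
--             run = 1
--             prev = q
--     if run > 0 and run == num_passengers:
--         count += 1
--     return count
-- ===== Notes on version B (the rewrite author's own statement) =====
-- stated objective: alternative
-- what changed: Replaces the defaultdict counting table plus key scan by sorting the answers and a single run-length pass over the sorted list, counting runs whose length equals num_passengers.
import Mathlib
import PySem

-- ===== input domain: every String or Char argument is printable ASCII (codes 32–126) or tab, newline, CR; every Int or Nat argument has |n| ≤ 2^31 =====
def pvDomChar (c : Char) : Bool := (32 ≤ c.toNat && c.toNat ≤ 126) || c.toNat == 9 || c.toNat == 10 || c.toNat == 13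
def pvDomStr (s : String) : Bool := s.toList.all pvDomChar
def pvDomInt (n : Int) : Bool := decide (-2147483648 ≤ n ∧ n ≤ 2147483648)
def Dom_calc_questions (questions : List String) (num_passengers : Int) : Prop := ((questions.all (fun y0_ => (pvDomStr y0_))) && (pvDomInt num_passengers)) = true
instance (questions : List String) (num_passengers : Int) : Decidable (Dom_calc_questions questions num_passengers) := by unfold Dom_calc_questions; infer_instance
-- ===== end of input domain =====

-- B replaces the defaultdict counting table by sort + run-length scan over equal runs (alternative decomposition, same results).


-- ===== PORT A =====
def calc_questions (questions : List String) (num_passengers : Int) : Int :=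
  -- answers = defaultdict(int); for answer in questions: answers[answer] += 1
  let answers := questions.foldl (fun d answer => d.modify answer 0 (· + 1)) PySem.Dict.empty
  -- count = 0; for answer in answers: if answers[answer] == num_passengers: count += 1
  answers.keys.foldl (fun count answer => if answers.getD answer 0 = num_passengers then count + 1 else count) 0

-- ===== PORT B =====
-- loop body: one element of the sorted list; state = (count, run, prev)
def pvStep (num_passengers : Int) (st : Int × Int × Option String) (q : String) : Int × Int × Option String :=
  if st.2.1 > 0 ∧ some q = st.2.2 then (st.1, st.2.1 + 1, st.2.2)
  else ((if st.2.1 > 0 ∧ st.2.1 = num_passengers then st.1 + 1 else st.1), 1, some q)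

def calc_questions_alt (questions : List String) (num_passengers : Int) : Int :=
  let st := (PySem.List.sorted questions (fun x => x) false).foldl (pvStep num_passengers) (0, 0, none)
  if st.2.1 > 0 ∧ st.2.1 = num_passengers then st.1 + 1 else st.1

-- ===== PRECONDITION & SPEC =====
def Spec_calc_questions (questions : List String) (num_passengers : Int) (out : Int) : Prop := out = calc_questions_alt questions num_passengers
instance (questions : List String) (num_passengers : Int) (out : Int) : Decidable (Spec_calc_questions questions num_passengers out) := by unfold Spec_calc_questions; infer_instance

-- ===== CLAIM (what is proved, stated in full; the proofs are below) =====
def Claim_equal_calc_questions : Prop := ∀ (questions : List String) (num_passengers : Int), Dom_calc_questions questions num_passengers → Spec_calc_questions questions num_passengers (calc_questions questions num_passengers)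

-- ===== LEMMAS AND PROOFS =====

-- A computes: number of distinct answers whose multiplicity is num_passengers
theorem calcA_eq (qs : List String) (n : Int) :
    calc_questions qs n
      = ((PySem.Set.ofList qs).countP (fun a => decide ((qs.count a : Int) = n)) : Int) := by
  unfold calc_questions
  rw [show (qs.foldl (fun d answer => d.modify answer 0 (· + 1)) PySem.Dict.empty) = PySem.Dict.counter qs from rfl]
  simp [PySem.Dict.keys_counter, PySem.Dict.getD_counter, PySem.List.foldl_ite_add_one]

theorem run_facts (a : String) (t : List String) (hp : List.Pairwise (· ≤ ·) (a :: t)) :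
    ∃ k rest, List.replicate k a ++ rest = a :: t ∧ 1 ≤ k ∧ k + rest.length = t.length + 1 ∧
      List.Pairwise (· ≤ ·) rest ∧ a ∉ rest ∧ (a :: t).count a = k ∧
      (∀ x ∈ rest, (a :: t).count x = rest.count x) ∧ (∀ x, x ∈ a :: t ↔ x = a ∨ x ∈ rest) := by
  have htw_rep : (a :: t).takeWhile (· == a)
      = List.replicate ((a :: t).takeWhile (· == a)).length a := by
    apply List.eq_replicate_of_mem
    intro b hb
    simpa using List.mem_takeWhile_imp hb
  have hsplit : (a :: t).takeWhile (· == a) ++ (a :: t).dropWhile (· == a) = a :: t :=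
    List.takeWhile_append_dropWhile
  have hk1 : 1 ≤ ((a :: t).takeWhile (· == a)).length := by simp
  have hpr : List.Pairwise (· ≤ ·) ((a :: t).dropWhile (· == a)) :=
    hp.sublist (List.dropWhile_sublist _)
  have ha_not : a ∉ (a :: t).dropWhile (· == a) := by
    intro hmem
    rcases hre : (a :: t).dropWhile (· == a) with _ | ⟨b, r'⟩
    · rw [hre] at hmem; simp at hmem
    · rw [hre] at hmem hpr
      have h2 := List.head?_dropWhile_not (· == a) (a :: t)
      rw [hre] at h2
      have hba : b ≠ a := by simpa using h2
      have harr' : a ∈ r' := by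
        rcases List.mem_cons.1 hmem with h | h
        · exact absurd h.symm hba
        · exact h
      have hb_le_a : b ≤ a := List.rel_of_pairwise_cons hpr harr'
      have hbt : b ∈ t := by
        have hbrest : b ∈ (a :: t).dropWhile (· == a) := by
          rw [hre]; exact List.mem_cons_self
        have hmem2 : b ∈ a :: t := (List.dropWhile_sublist _).subset hbrest
        rcases List.mem_cons.1 hmem2 with h | h
        · exact absurd h hba
        · exact h
      exact hba (le_antisymm hb_le_a (List.rel_of_pairwise_cons hp hbt))
  refine ⟨((a :: t).takeWhile (· == a)).length, (a :: t).dropWhile (· == a),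
    ?_, hk1, ?_, hpr, ha_not, ?_, ?_, ?_⟩
  · rw [← htw_rep]; exact hsplit
  · have := congrArg List.length hsplit
    rw [List.length_append] at this
    simp only [List.length_cons] at this
    omega
  · conv_lhs => rw [← hsplit]
    rw [List.count_append]
    conv_lhs => rw [htw_rep]
    rw [List.count_replicate_self, List.count_eq_zero.2 ha_not]
    omega
  · intro x hx
    have hxa : x ≠ a := fun h => ha_not (h ▸ hx)
    conv_lhs => rw [← hsplit]
    rw [List.count_append]
    conv_lhs => rw [htw_rep]
    rw [List.count_replicate]
    simp [Ne.symm hxa]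
  · intro x
    conv_lhs => rw [← hsplit]
    rw [List.mem_append]
    constructor
    · rintro (hx | hx)
      · left
        rw [htw_rep] at hx
        exact List.eq_of_mem_replicate hx
      · right; exact hx
    · rintro (rfl | hx)
      · left; rw [htw_rep]; exact List.mem_replicate.2 ⟨by omega, rfl⟩
      · right; exact hx

def pvFin (num : Int) (st : Int × Int × Option String) : Int :=
  if st.2.1 > 0 ∧ st.2.1 = num then st.1 + 1 else st.1

theorem pvStep_replicate : ∀ (j : Nat) (num c k : Int) (b : String), 1 ≤ k →
    (List.replicate j b).foldl (pvStep num) (c, k, some b) = (c, k + j, some b)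
  | 0, num, c, k, b, _ => by simp
  | j + 1, num, c, k, b, hk => by
    rw [List.replicate_succ, List.foldl_cons]
    have hstep : pvStep num (c, k, some b) b = (c, k + 1, some b) := by
      unfold pvStep
      rw [if_pos (⟨show k > 0 by omega, rfl⟩ : _)]
    rw [hstep, pvStep_replicate j num c (k + 1) b (by omega)]
    have : k + 1 + (j : Int) = k + ((j : Nat) + 1 : Nat) := by push_cast; ring
    rw [this]

theorem loop_eq : ∀ (m : Nat) (l : List String), l.length ≤ m → l.Pairwise (· ≤ ·) →
    ∀ (num c run : Int) (prev : Option String),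
    ((run = 0 ∧ prev = none) ∨ (1 ≤ run ∧ ∃ a, prev = some a ∧ a ∉ l)) →
    pvFin num (l.foldl (pvStep num) (c, run, prev))
      = c + (if run > 0 ∧ run = num then 1 else 0)
          + ((PySem.Set.ofList l).countP (fun a => decide ((l.count a : Int) = num)) : Int) := by
  intro m
  induction m with
  | zero =>
    intro l hl _ num c run prev _
    have : l = [] := List.length_eq_zero_iff.1 (Nat.le_zero.1 hl)
    subst this
    simp only [List.foldl_nil, pvFin]
    have h0 : (PySem.Set.ofList ([] : List String)) = [] := rfl
    rw [h0]
    simp only [List.countP_nil]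
    split_ifs <;> omega
  | succ m ih =>
    intro l hl hp num c run prev hst
    match l with
    | [] =>
      simp only [List.foldl_nil, pvFin]
      have h0 : (PySem.Set.ofList ([] : List String)) = [] := rfl
      rw [h0]
      simp only [List.countP_nil]
      split_ifs <;> omega
    | b :: t =>
      obtain ⟨k, rest, hsplit, hk1, hlen, hpr, hb_not, hcount_b, hcount_x, hmem_iff⟩ :=
        run_facts b t hp
      -- the first step closes any pending run and opens the run of b
      have hfirst : pvStep num (c, run, prev) b
          = ((if run > 0 ∧ run = num then c + 1 else c), 1, some b) := by
        unfold pvStep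
        rw [if_neg]
        rintro ⟨hrun, hprev⟩
        rcases hst with ⟨h0, _⟩ | ⟨_, a, ha, hanot⟩
        · simp at hrun
          omega
        · rw [ha] at hprev
          have hba : b = a := by injection hprev
          exact hanot (hba ▸ List.mem_cons_self)
      have hrep : List.replicate k b = b :: List.replicate (k - 1) b := by
        rw [← List.replicate_succ]
        congr 1
        omega
      have hcast : (1 : Int) + ((k - 1 : Nat) : Int) = (k : Int) := by
        have : ((k - 1 : Nat) : Int) = (k : Int) - 1 := by push_cast [hk1]; ring
        omega
      have hrun_fold : (b :: t).foldl (pvStep num) (c, run, prev)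
          = rest.foldl (pvStep num)
              ((if run > 0 ∧ run = num then c + 1 else c), (k : Int), some b) := by
        conv_lhs => rw [← hsplit]
        rw [List.foldl_append, hrep, List.foldl_cons, hfirst,
          pvStep_replicate (k - 1) num _ 1 b (by omega), hcast]
      have hlen_rest : rest.length ≤ m := by
        simp only [List.length_cons] at hl
        omega
      have hperm : (PySem.Set.ofList (b :: t)).Perm (b :: PySem.Set.ofList rest) := by
        rw [List.perm_ext_iff_of_nodup (PySem.Set.nodup_ofList _)
          (List.nodup_cons.2 ⟨fun h => hb_not ((PySem.Set.mem_ofList _ _).1 h), PySem.Set.nodup_ofList _⟩)]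
        intro x
        simp only [PySem.Set.mem_ofList, List.mem_cons]
        have h := hmem_iff x
        simp only [List.mem_cons] at h
        exact h
      have hcongr : (PySem.Set.ofList rest).countP (fun x => decide (((b :: t).count x : Int) = num))
          = (PySem.Set.ofList rest).countP (fun x => decide ((rest.count x : Int) = num)) := by
        apply List.countP_congr
        intro x hx
        rw [hcount_x x ((PySem.Set.mem_ofList _ _).1 hx)]
      rw [hrun_fold,
        ih rest hlen_rest hpr num _ (k : Int) (some b)
          (Or.inr ⟨by exact_mod_cast hk1, b, rfl, hb_not⟩),
        hperm.countP_eq, List.countP_cons, hcongr, hcount_b]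
      have hkpos : (0 : Int) < (k : Int) := by exact_mod_cast hk1
      simp only [decide_eq_true_eq]
      split_ifs <;> push_cast <;> omega

-- the counted quantity only depends on the multiset of answers
theorem spec_perm (qs qs' : List String) (n : Int) (h : qs.Perm qs') :
    ((PySem.Set.ofList qs).countP (fun a => decide ((qs.count a : Int) = n)) : Int)
      = ((PySem.Set.ofList qs').countP (fun a => decide ((qs'.count a : Int) = n)) : Int) := by
  have hperm : (PySem.Set.ofList qs).Perm (PySem.Set.ofList qs') := by
    rw [List.perm_ext_iff_of_nodup (PySem.Set.nodup_ofList _) (PySem.Set.nodup_ofList _)]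
    intro x
    rw [PySem.Set.mem_ofList, PySem.Set.mem_ofList]
    exact h.mem_iff
  rw [hperm.countP_eq]
  congr 1
  apply List.countP_congr
  intro x _
  rw [h.count_eq]

-- ===== VERDICT (by name: the statement is the Claim_ definition above) =====
theorem calc_questions_spec : Claim_equal_calc_questions := by
  intro qs n _
  unfold Spec_calc_questions
  have h1 : calc_questions_alt qs n
      = pvFin n ((PySem.List.sorted qs (fun x => x) false).foldl (pvStep n) (0, 0, none)) := rfl
  have hsorted : (PySem.List.sorted qs (fun x => x) false).Pairwise (· ≤ ·) :=
    PySem.List.sorted_pairwise qs (fun x => x)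
  rw [calcA_eq, h1,
    loop_eq _ _ (Nat.le_refl _) hsorted n 0 0 none (Or.inl ⟨rfl, rfl⟩)]
  simp only [zero_add]
  rw [spec_perm qs _ n (PySem.List.sorted_perm qs (fun x => x) false).symm]
  split_ifs with h
  · omega
  · ring
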